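-- pv_equiv track=rewrite | github.com/Adineamtu/BladeEye-Automated-Detection-Monitor | bladeeye_pro/capture_lab.py | decode_differential_manchester
-- ===== SOURCE A (Python) =====
-- def decode_differential_manchester(bits: str) -> str:
--     clean = "".join(b for b in bits if b in {"0", "1"})
--     pairs = [clean[i : i + 2] for i in range(0, len(clean) - 1, 2)]
--     out = []
--     previous = pairs[0] if pairs else "10"
--     for pair in pairs:
--         out.append("0" if pair[0] != previous[0] else "1")
--         previous = pair
--     return "".join(out)
-- ===== SOURCE B (Python) =====
-- def decode_differential_manchester(bits: str) -> str:
--     clean = [b for b in bits if b in ("0", "1")]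
--     L = len(clean) // 2
--     if L == 0:
--         return ""
--     x = int("".join(clean[i] for i in range(0, 2 * L, 2)), 2)
--     r = ((x ^ (x >> 1)) ^ ((1 << L) - 1)) | (1 << (L - 1))
--     return format(r, "0{}b".format(L))
-- ===== Notes on version B (the rewrite author's own statement) =====
-- stated objective: alternative
-- what changed: Replaces A's per-pair stateful loop with integer bit arithmetic: the sampled first bits are packed into one integer x, and the whole output is computed at once as the complemented self-xor (x ^ (x >> 1)) masked to width and with the leading bit forced to 1, then formatted back to a binary string.
import Mathlib
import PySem

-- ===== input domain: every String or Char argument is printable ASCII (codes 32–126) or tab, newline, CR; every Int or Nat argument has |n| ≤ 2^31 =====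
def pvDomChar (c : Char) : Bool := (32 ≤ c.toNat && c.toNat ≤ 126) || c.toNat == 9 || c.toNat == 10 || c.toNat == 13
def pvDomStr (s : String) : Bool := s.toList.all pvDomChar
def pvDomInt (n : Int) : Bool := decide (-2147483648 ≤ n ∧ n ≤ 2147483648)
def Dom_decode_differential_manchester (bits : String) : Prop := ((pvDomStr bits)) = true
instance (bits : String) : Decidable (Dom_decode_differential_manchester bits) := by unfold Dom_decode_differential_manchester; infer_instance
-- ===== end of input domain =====

-- B replaces A's stateful per-pair loop with integer bit arithmetic: it packs the
-- sampled first bits into one integer x and computes the whole output at once as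
-- ((x ^ (x >> 1)) ^ mask) | leading-bit, formatted back to a binary string.

-- ===== PORT A =====
-- Literal port of A: strings become List Char; pair[0] is read with pyGetD (every pair
-- produced by range(0, len-1, 2) has length 2, so the Python indexing never raises).
def decode_differential_manchester (bits : String) : String :=
  let clean : List Char := bits.toList.filter (fun b => b == '0' || b == '1')
  let pairs : List (List Char) :=
    (PySem.List.pyRange 0 ((clean.length : Int) - 1) 2).map
      (fun i => PySem.List.slice clean (some i) (some (i + 2)))
  let previous : List Char := if pairs = [] then ['1', '0'] else pairs.headD []
  let res :=
    pairs.foldl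
      (fun (st : List Char × List Char) pair =>
        (st.1 ++ [if PySem.List.pyGetD pair 0 ' ' ≠ PySem.List.pyGetD st.2 0 ' '
                  then '0' else '1'],
         pair))
      ([], previous)
  String.mk res.1

-- ===== PORT B =====
-- int("".join(ds), 2) for a string of binary digits: the standard base-2 fold.
def pvBitsVal (cs : List Char) : Nat :=
  cs.foldl (fun a c => 2 * a + (if c == '1' then 1 else 0)) 0

-- format(r, "0{L}b"): width-L zero-padded binary rendering; exact whenever r < 2^L,
-- which holds for the r that B builds (it is masked to L bits).
def pvFormatBin (L r : Nat) : List Char :=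
  (List.range L).map (fun i => if r.testBit (L - 1 - i) then '1' else '0')

def decode_differential_manchester_alt (bits : String) : String :=
  let clean : List Char := bits.toList.filter (fun b => b == '0' || b == '1')
  let L : Nat := clean.length / 2
  if L = 0 then ""
  else
    let firsts : List Char :=
      (PySem.List.pyRange 0 (2 * (L : Int)) 2).map (fun i => PySem.List.pyGetD clean i ' ')
    let x : Nat := pvBitsVal firsts
    let r : Nat := ((x ^^^ (x >>> 1)) ^^^ (2 ^ L - 1)) ||| 2 ^ (L - 1)
    String.mk (pvFormatBin L r)

-- ===== PRECONDITION & SPEC =====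
def Spec_decode_differential_manchester (bits : String) (out : String) : Prop := out = decode_differential_manchester_alt bits
instance (bits : String) (out : String) : Decidable (Spec_decode_differential_manchester bits out) := by unfold Spec_decode_differential_manchester; infer_instance

-- ===== CLAIM (what is proved, stated in full; the proofs are below) =====
def Claim_equal_decode_differential_manchester : Prop := ∀ (bits : String), Dom_decode_differential_manchester bits → Spec_decode_differential_manchester bits (decode_differential_manchester bits)

-- ===== LEMMAS AND PROOFS =====
theorem pvRange_two_cons (b : Int) (h : 0 < b) :
    PySem.List.pyRange 0 b 2 = 0 :: (PySem.List.pyRange 0 (b - 2) 2).map (· + 2) := by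
  rw [PySem.List.pyRange_of_pos 0 b (by norm_num),
      PySem.List.pyRange_of_pos 0 (b - 2) (by norm_num)]
  by_cases h2 : (0 : Int) < b - 2
  · have hb : ((b - 0 + 2 - 1) / 2).toNat = ((b - 2 - 0 + 2 - 1) / 2).toNat + 1 := by omega
    rw [if_pos h, if_pos h2, hb, List.range_succ_eq_map]
    simp only [List.map_cons, List.map_map, List.cons.injEq]
    refine ⟨by norm_num, ?_⟩
    apply List.map_congr_left; intro k _; simp; ring
  · have hb : ((b - 0 + 2 - 1) / 2).toNat = 1 := by omega
    rw [if_pos h, if_neg h2, hb]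
    simp [List.range_succ]

def pvPairsOf : List Char → List (Char × Char)
  | a :: b :: rest => (a, b) :: pvPairsOf rest
  | _ => []

theorem pvRange_two_nil (b : Int) (h : b ≤ 0) : PySem.List.pyRange 0 b 2 = [] := by
  rw [PySem.List.pyRange_of_pos 0 b (by norm_num)]
  rw [if_neg (by omega)]
  simp

/-- range(0, len(clean)-1, 2) and range(0, 2*(len(clean)//2), 2) enumerate the same indices. -/
theorem pvRange_eq (n : Nat) :
    PySem.List.pyRange 0 (2 * ((n / 2 : Nat) : Int)) 2
      = PySem.List.pyRange 0 ((n : Int) - 1) 2 := by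
  by_cases h : n ≤ 1
  · rw [pvRange_two_nil _ (by omega), pvRange_two_nil _ (by omega)]
  · rw [PySem.List.pyRange_of_pos 0 _ (by norm_num),
        PySem.List.pyRange_of_pos 0 ((n : Int) - 1) (by norm_num)]
    rw [if_pos (by omega), if_pos (by omega)]
    have : ((2 * ((n / 2 : Nat) : Int) - 0 + 2 - 1) / 2).toNat
        = (((n : Int) - 1 - 0 + 2 - 1) / 2).toNat := by omega
    rw [this]

theorem pvSlice_pairs : ∀ (l : List Char),
    (PySem.List.pyRange 0 ((l.length : Int) - 1) 2).map
        (fun i => PySem.List.slice l (some i) (some (i + 2)))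
      = (pvPairsOf l).map (fun p => [p.1, p.2])
  | [] => by simp [pvPairsOf, pvRange_two_nil]
  | [a] => by simp [pvPairsOf, pvRange_two_nil]
  | a :: b :: rest => by
    have ih := pvSlice_pairs rest
    have h0 : (0 : Int) < ((a :: b :: rest).length : Int) - 1 := by
      have : (a :: b :: rest).length = rest.length + 2 := by simp
      omega
    rw [pvRange_two_cons _ h0]
    simp only [List.map_cons, List.map_map, pvPairsOf, List.cons.injEq]
    constructor
    · rw [PySem.List.slice_toNat (a :: b :: rest) (by norm_num) (by norm_num)]
      simp
    · have harg : ((a :: b :: rest).length : Int) - 1 - 2 = ((rest.length : Int) - 1) := by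
        simp; omega
      rw [harg, ← ih]
      apply List.map_congr_left
      intro i hi
      have hpos : 0 ≤ i ∧ i < (rest.length : Int) - 1 ∧ (2 : Int) ∣ i - 0 :=
        (PySem.List.mem_pyRange_iff_of_pos (by norm_num) i).mp hi
      simp only [Function.comp]
      have hlen : ((a :: b :: rest).length : Int) = (rest.length : Int) + 2 := by simp; omega
      rw [PySem.List.slice_toNat (a :: b :: rest) (by omega) (by omega),
          PySem.List.slice_toNat rest (by omega) (by omega)]
      have h1 : (i + 2).toNat = i.toNat + 2 := by omega
      have h2 : (i + 2 + 2).toNat = i.toNat + 2 + 2 := by omega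
      rw [h1, h2]
      have h3 : i.toNat + 2 - i.toNat = 2 := by omega
      have h4 : i.toNat + 2 + 2 - (i.toNat + 2) = 2 := by omega
      rw [h3, h4]
      simp

theorem pvGet_firsts : ∀ (l : List Char),
    (PySem.List.pyRange 0 ((l.length : Int) - 1) 2).map
        (fun i => PySem.List.pyGetD l i ' ')
      = (pvPairsOf l).map Prod.fst
  | [] => by simp [pvPairsOf, pvRange_two_nil]
  | [a] => by simp [pvPairsOf, pvRange_two_nil]
  | a :: b :: rest => by
    have ih := pvGet_firsts rest
    have h0 : (0 : Int) < ((a :: b :: rest).length : Int) - 1 := by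
      have : (a :: b :: rest).length = rest.length + 2 := by simp
      omega
    rw [pvRange_two_cons _ h0]
    simp only [List.map_cons, List.map_map, pvPairsOf, List.cons.injEq]
    constructor
    · simp [PySem.List.pyGetD_zero_cons]
    · have harg : ((a :: b :: rest).length : Int) - 1 - 2 = ((rest.length : Int) - 1) := by
        simp; omega
      rw [harg, ← ih]
      apply List.map_congr_left
      intro i hi
      have hpos : 0 ≤ i ∧ i < (rest.length : Int) - 1 ∧ (2 : Int) ∣ i - 0 :=
        (PySem.List.mem_pyRange_iff_of_pos (by norm_num) i).mp hi
      simp only [Function.comp]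
      have hlen : ((a :: b :: rest).length : Int) = (rest.length : Int) + 2 := by simp; omega
      rw [PySem.List.pyGetD_eq_getElem (a :: b :: rest) ' ' (by omega) (by omega),
          PySem.List.pyGetD_eq_getElem rest ' ' (by omega) (by omega)]
      have h1 : (i + 2).toNat = i.toNat + 2 := by omega
      simp [h1]

/-- A's loop, abstracted to the only datum it reads from each pair: its first char. -/
def pvLoopA : List Char → Char → List Char
  | [], _ => []
  | c :: cs, p => (if c ≠ p then '0' else '1') :: pvLoopA cs c

/-- A's foldl over full pairs equals `pvLoopA` over the first chars. -/
theorem pvFoldA (ps : List (Char × Char)) (acc : List Char) (pc : Char) (pr : List Char) :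
    ((ps.map (fun p => [p.1, p.2])).foldl
        (fun (st : List Char × List Char) pair =>
          (st.1 ++ [if PySem.List.pyGetD pair 0 ' ' ≠ PySem.List.pyGetD st.2 0 ' '
                    then '0' else '1'],
           pair))
        (acc, pc :: pr)).1
      = acc ++ pvLoopA (ps.map Prod.fst) pc := by
  induction ps generalizing acc pc pr with
  | nil => simp [pvLoopA]
  | cons p ps ih =>
    simp only [List.map_cons, List.foldl_cons, pvLoopA]
    rw [ih]
    simp [PySem.List.pyGetD_zero_cons, List.append_assoc]

theorem pvLoopA_zip (cs : List Char) (p : Char) :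
    pvLoopA cs p
      = List.zipWith (fun a b => if a ≠ b then '0' else '1') (p :: cs) cs := by
  induction cs generalizing p with
  | nil => simp [pvLoopA]
  | cons c cs ih =>
    simp only [pvLoopA, List.zipWith]
    rw [ih]
    congr 1
    by_cases h : c = p <;> simp [h, eq_comm]

theorem pvPairsOf_length : ∀ l : List Char, (pvPairsOf l).length = l.length / 2
  | [] => by simp [pvPairsOf]
  | [a] => by simp [pvPairsOf]
  | a :: b :: rest => by
    simp only [pvPairsOf, List.length_cons]
    rw [pvPairsOf_length rest]; omega

theorem pvPairsOf_fst_mem : ∀ (l : List Char) (c : Char),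
    c ∈ (pvPairsOf l).map Prod.fst → c ∈ l
  | [] , c => by simp [pvPairsOf]
  | [a], c => by simp [pvPairsOf]
  | a :: b :: rest, c => by
    simp only [pvPairsOf, List.map_cons, List.mem_cons]
    rintro (rfl | h)
    · simp
    · have := pvPairsOf_fst_mem rest c h
      simp [this]

theorem pvBitsVal_append (cs : List Char) (c : Char) :
    pvBitsVal (cs ++ [c]) = 2 * pvBitsVal cs + (if c == '1' then 1 else 0) := by
  simp [pvBitsVal, List.foldl_append]

theorem pvBitsVal_testBit : ∀ (cs : List Char), ∀ j < cs.length,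
    (pvBitsVal cs).testBit j = (cs.getD (cs.length - 1 - j) ' ' == '1') := by
  intro cs
  induction cs using List.reverseRecOn with
  | nil => intro j hj; simp at hj
  | append_singleton ds c ih =>
    intro j hj
    rw [pvBitsVal_append]
    have hd : (if c == '1' then 1 else 0) ≤ 1 := by by_cases h : c == '1' <;> simp [h]
    cases j with
    | zero =>
      have hmod : (2 * pvBitsVal ds + (if c == '1' then 1 else 0)) % 2
          = (if c == '1' then 1 else 0) := by omega
      have hidx : (ds ++ [c]).length - 1 - 0 = ds.length := by simp
      rw [Nat.testBit_zero, hmod, hidx]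
      by_cases h : c == '1' <;> simp [h]
    | succ k =>
      have hk : k < ds.length := by simp at hj; omega
      have hdiv : (2 * pvBitsVal ds + (if c == '1' then 1 else 0)) / 2 = pvBitsVal ds := by
        omega
      rw [Nat.testBit_succ, hdiv, ih k hk]
      have hidx : (ds ++ [c]).length - 1 - (k + 1) = ds.length - 1 - k := by simp; omega
      rw [hidx]
      have hlt : ds.length - 1 - k < ds.length := by omega
      rw [List.getD_append _ _ _ _ hlt]

/-- Core lemma: the bit-arithmetic rendering equals the stateless pairwise form. -/
theorem pvBits_main (s : List Char) (hne : s ≠ [])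
    (hbin : ∀ c ∈ s, c = '0' ∨ c = '1') :
    pvFormatBin s.length
        (((pvBitsVal s ^^^ (pvBitsVal s >>> 1)) ^^^ (2 ^ s.length - 1)) ||| 2 ^ (s.length - 1))
      = '1' :: List.zipWith (fun a b => if a ≠ b then '0' else '1') s s.tail := by
  have hL : 0 < s.length := List.length_pos_iff.mpr hne
  apply List.ext_getElem
  · simp only [pvFormatBin, List.length_map, List.length_range, List.length_cons,
      List.length_zipWith, List.length_tail]
    omega
  · intro i hi hi'
    simp only [pvFormatBin, List.getElem_map, List.getElem_range] at hi ⊢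
    simp only [List.length_map, List.length_range] at hi
    cases i with
    | zero =>
      simp [Nat.testBit_or]
    | succ k =>
      have hk1 : k + 1 < s.length := hi
      have hj : s.length - 1 - (k + 1) = s.length - 2 - k := by omega
      set j := s.length - 2 - k with hjdef
      have hjL : j < s.length - 1 := by omega
      have hjlt : j < s.length := by omega
      have hj1lt : j + 1 < s.length := by omega
      -- the or-bit is off, the mask-bit is on
      have hor : (2 ^ (s.length - 1)).testBit j = false := by
        rw [Nat.testBit_two_pow]
        simp; omega
      have hmask : (2 ^ s.length - 1).testBit j = true := by
        rw [Nat.testBit_two_pow_sub_one]; simp; omega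
      have hb1 : (pvBitsVal s).testBit j = (s.getD (s.length - 1 - j) ' ' == '1') :=
        pvBitsVal_testBit s j hjlt
      have hb2 : (pvBitsVal s).testBit (j + 1) = (s.getD (s.length - 1 - (j + 1)) ' ' == '1') :=
        pvBitsVal_testBit s (j + 1) hj1lt
      have hi1 : s.length - 1 - j = k + 1 := by omega
      have hi2 : s.length - 1 - (j + 1) = k := by omega
      rw [hj]
      rw [Nat.testBit_or, Nat.testBit_xor, Nat.testBit_xor, Nat.testBit_shiftRight]
      have hadd : 1 + j = j + 1 := by omega
      rw [hadd, hb1, hb2, hi1, hi2, hmask, hor]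
      have hgk : s.getD k ' ' = s[k] := List.getD_eq_getElem s ' ' (by omega)
      have hgk1 : s.getD (k + 1) ' ' = s[k + 1] := List.getD_eq_getElem s ' ' hk1
      rw [hgk, hgk1]
      -- rhs
      have htl : s.tail.length = s.length - 1 := by simp
      have hrhs : ('1' :: List.zipWith (fun a b => if a ≠ b then '0' else '1') s s.tail)[k + 1]'(hi') =
          (if s[k] ≠ s[k + 1] then '0' else '1') := by
        have hk' : k < (List.zipWith (fun a b => if a ≠ b then '0' else '1') s s.tail).length := by
          simp [List.length_zipWith]; omega
        have := List.getElem_cons_succ (a := '1')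
          (as := List.zipWith (fun a b => if a ≠ b then '0' else '1') s s.tail) (i := k) hi'
        rw [this, List.getElem_zipWith]
        simp [List.getElem_tail]
      rw [hrhs]
      rcases hbin s[k] (List.getElem_mem _) with h1 | h1 <;>
        rcases hbin s[k+1] (List.getElem_mem _) with h2 | h2 <;>
          simp [h1, h2]

-- ===== VERDICT (by name: the statement is the Claim_ definition above) =====
theorem decode_differential_manchester_spec : Claim_equal_decode_differential_manchester := by
  intro bits _
  unfold Spec_decode_differential_manchester
  unfold decode_differential_manchester decode_differential_manchester_alt
  set clean : List Char := bits.toList.filter (fun b => b == '0' || b == '1') with hclean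
  have hbinc : ∀ c ∈ clean, c = '0' ∨ c = '1' := by
    intro c hc
    rw [hclean] at hc
    have := (List.mem_filter.mp hc).2
    rcases Bool.or_eq_true_iff.mp this with h | h
    · left; exact beq_iff_eq.mp h
    · right; exact beq_iff_eq.mp h
  simp only [pvSlice_pairs]
  rw [pvRange_eq clean.length, pvGet_firsts]
  set F : List Char := (pvPairsOf clean).map Prod.fst with hF
  have hFlen : F.length = clean.length / 2 := by
    rw [hF, List.length_map, pvPairsOf_length]
  have hbinF : ∀ c ∈ F, c = '0' ∨ c = '1' := by
    intro c hc; exact hbinc c (pvPairsOf_fst_mem clean c (hF ▸ hc))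
  by_cases hz : clean.length / 2 = 0
  · have hFnil : pvPairsOf clean = [] := by
      have := pvPairsOf_length clean
      rw [hz] at this
      exact List.eq_nil_of_length_eq_zero this
    simp [hFnil, hz]
    rfl
  · have hpne : pvPairsOf clean ≠ [] := by
      intro h
      have := pvPairsOf_length clean
      rw [h] at this; simp at this; omega
    rw [if_neg hz]
    cases hp : pvPairsOf clean with
    | nil => exact absurd hp hpne
    | cons q qs =>
      have hfold := pvFoldA (q :: qs) [] q.1 [q.2]
      simp only [List.map_cons] at hfold
      simp only [List.map_cons, List.headD_cons, reduceCtorEq, if_false]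
      rw [hfold, pvLoopA_zip]
      have hFc : F = q.1 :: qs.map Prod.fst := by rw [hF, hp, List.map_cons]
      have hmain := pvBits_main F (by rw [hFc]; simp) hbinF
      rw [hFlen] at hmain
      rw [List.nil_append, hmain]
      congr 1
      rw [hFc]
      simp [List.zipWith]
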